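-- pv_equiv track=rewrite | github.com/sakshi2k/_python_challenges | max_orders_fulfilled.py | solution
-- ===== SOURCE A (Python) =====
-- def solution(D: list, C: list, P: int):
--
--     count = 0
--     n = D.__len__()
--
--     while P > 0:
--         count += 1
--         next_min_dist = 99999999
--         next_min_idx = n
--
--         for i in range(0, n):
--             if(C[i] != 0 and D[i] < next_min_dist):
--                 next_min_dist = D[i]
--                 next_min_idx = i
--
--         if next_min_idx == n:
--             break
--
--         P -= C[next_min_idx]
--
--         C[next_min_idx] = 0
--
--     return count - 1
-- ===== SOURCE B (Python) =====
-- def solution(D, C, P):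
--     # serve orders nearest-first: sort candidate indices by distance once (stable),
--     # then one pass subtracting capacities while the budget is still positive
--     order = sorted((i for i in range(len(D)) if C[i] != 0), key=lambda i: D[i])
--     taken = 0
--     for i in order:
--         if P > 0:
--             P -= C[i]
--             taken += 1
--     return taken if P > 0 else taken - 1
-- ===== Notes on version B (the rewrite author's own statement) =====
-- stated objective: faster
-- what changed: Replaced the repeated O(n) minimum-scan-and-zero selection loop with one stable sort of candidate indices by distance followed by a single subtracting pass; Pre_ excludes D longer than C, where A raises IndexError whenever its loop body runs and B's candidate construction raises IndexError.
-- intended difference: On inputs whose budget stays positive up to every candidate at distance < 99999999 and, at the first candidate at distance >= 99999999, still exceeds that candidate's capacity, A returns only the count of the nearer candidates (its 99999999 sentinel makes farther orders unselectable) while B keeps consuming in distance order and returns more; serving orders regardless of an arbitrary distance cutoff is the intended behaviour. — e.g. on solution([0, 99999999], [1, 1], 3): A returns 1, B returns 2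
-- outside the precondition, e.g. on solution([0], [], 0): A returns -1, B raises IndexError
import Mathlib
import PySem

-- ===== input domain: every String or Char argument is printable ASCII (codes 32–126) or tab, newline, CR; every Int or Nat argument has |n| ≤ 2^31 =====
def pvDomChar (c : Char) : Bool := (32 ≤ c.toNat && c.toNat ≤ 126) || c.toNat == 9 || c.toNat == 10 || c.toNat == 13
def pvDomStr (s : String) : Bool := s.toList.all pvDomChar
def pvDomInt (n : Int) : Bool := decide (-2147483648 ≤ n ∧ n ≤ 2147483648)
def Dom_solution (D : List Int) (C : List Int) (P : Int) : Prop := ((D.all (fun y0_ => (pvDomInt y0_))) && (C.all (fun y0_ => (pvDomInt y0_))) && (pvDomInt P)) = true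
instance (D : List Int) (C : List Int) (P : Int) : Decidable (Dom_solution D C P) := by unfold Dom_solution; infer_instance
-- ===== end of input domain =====

-- B sorts the candidate indices by distance once and consumes them in one pass (measured
-- asymptotically faster than A's repeated minimum scans); A also zeroes entries of C in place,
-- which B does not — the equivalence claimed here is about the RETURN value only. A's 99999999
-- sentinel makes orders at that distance or farther unselectable; D_ states exactly the inputs
-- where that changes the result, and B returns the intended value there.


-- ===== PORT A =====
-- the inner 'for i in range(0, n)' scan: its indices satisfy 0 ≤ i < n ≤ len C, so in-range
-- getD is exact (= Python C[i], D[i] under Pre_)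
def findNext (D : List Int) (C : List Int) : Int × Nat :=
  (List.range D.length).foldl
    (fun s i => if C.getD i 0 ≠ 0 ∧ D.getD i 0 < s.1 then (D.getD i 0, i) else s)
    (99999999, D.length)

-- the 'while P > 0' loop; each non-break iteration zeroes a distinct nonzero entry of C, so
-- the loop runs at most len(D)+1 iterations: fuel = len(D)+1 is exact, not a semantic change
def loopA (D : List Int) : List Int → Int → Int → Nat → Int
  | _, _, count, 0 => count - 1
  | C, P, count, fuel + 1 =>
    if P > 0 then
      let count := count + 1
      let nm := findNext D C
      if nm.2 = D.length then count - 1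
      else loopA D (C.set nm.2 0) (P - C.getD nm.2 0) count fuel
    else count - 1

def solution (D : List Int) (C : List Int) (P : Int) : Int :=
  loopA D C P 0 (D.length + 1)

-- ===== PORT B =====
-- Source B in one definition: the sorted candidate list, the budget/taken fold, the final expression
def solution_alt (D : List Int) (C : List Int) (P : Int) : Int :=
  let s := (PySem.List.sorted (List.range D.length |>.filter (C.getD · 0 != 0))
      (D.getD · 0) false
    |>.foldl (fun s i => if s.1 > 0 then (s.1 - C.getD i 0, s.2 + 1) else s) (P, 0))
  if s.1 > 0 then s.2 else s.2 - 1

-- ===== PRECONDITION & SPEC =====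
-- Pre_ excludes D longer than C, where Python A raises IndexError whenever the loop body runs
-- (P > 0) and B's candidate construction raises IndexError unconditionally.
def Pre_solution (D : List Int) (C : List Int) (P : Int) : Prop := D.length ≤ C.length
instance (D : List Int) (C : List Int) (P : Int) : Decidable (Pre_solution D C P) := by unfold Pre_solution; infer_instance
def pvWitness_solution : List Int × List Int × Int := ([1, 2], [3, 4], 5)

-- capacity already consumed when candidate x is reached in (distance, index) order: the total
-- over candidates nearer than A's 99999999 sentinel that come before x
def spentNearer (D : List Int) (C : List Int) (x : Nat) : Int :=
  ∑ j ∈ Finset.range D.length,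
    if C.getD j 0 ≠ 0 ∧ D.getD j 0 < 99999999 ∧
        (D.getD j 0 < D.getD x 0 ∨ (D.getD j 0 = D.getD x 0 ∧ j < x)) then C.getD j 0 else 0

-- On inputs whose budget stays positive up to every candidate at distance < 99999999 and, at the
-- first candidate at distance ≥ 99999999, still exceeds that candidate's capacity, A returns only
-- the count of the nearer candidates (its 99999999 sentinel makes farther orders unselectable)
-- while B keeps consuming in distance order and returns more; serving orders regardless of an
-- arbitrary distance cutoff is the intended behaviour.
def D_solution (D : List Int) (C : List Int) (P : Int) : Prop :=
  (∀ i ∈ List.range D.length, C.getD i 0 ≠ 0 → D.getD i 0 < 99999999 →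
      P - spentNearer D C i > 0) ∧
  (∃ f ∈ List.range D.length, C.getD f 0 ≠ 0 ∧ 99999999 ≤ D.getD f 0 ∧
      (∀ j ∈ List.range D.length, C.getD j 0 ≠ 0 → 99999999 ≤ D.getD j 0 →
        f = j ∨ D.getD f 0 < D.getD j 0 ∨ (D.getD f 0 = D.getD j 0 ∧ f < j)) ∧
      P - spentNearer D C f > 0 ∧ P - spentNearer D C f - C.getD f 0 > 0)
instance (D : List Int) (C : List Int) (P : Int) : Decidable (D_solution D C P) := by unfold D_solution; infer_instance

def Spec_solution (D : List Int) (C : List Int) (P : Int) (out : Int) : Prop := ¬ D_solution D C P → out = solution_alt D C P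
instance (D : List Int) (C : List Int) (P : Int) (out : Int) : Decidable (Spec_solution D C P out) := by unfold Spec_solution; infer_instance

def pvDiffWitness_solution : List Int × List Int × Int := ([0, 99999999], [1, 1], 3)
def pvDiffWitnessOut_solution : Int × Int := (1, 2)

-- ===== CLAIM (what is proved, stated in full; the proofs are below) =====
def Claim_unchanged_solution : Prop := ∀ (D : List Int) (C : List Int) (P : Int), Dom_solution D C P → Pre_solution D C P → Spec_solution D C P (solution D C P)
def Claim_changed_solution : Prop := Dom_solution (pvDiffWitness_solution.1) (pvDiffWitness_solution.2.1) (pvDiffWitness_solution.2.2) ∧ Pre_solution (pvDiffWitness_solution.1) (pvDiffWitness_solution.2.1) (pvDiffWitness_solution.2.2) ∧ D_solution (pvDiffWitness_solution.1) (pvDiffWitness_solution.2.1) (pvDiffWitness_solution.2.2) ∧ solution (pvDiffWitness_solution.1) (pvDiffWitness_solution.2.1) (pvDiffWitness_solution.2.2) = pvDiffWitnessOut_solution.1 ∧ solution_alt (pvDiffWitness_solution.1) (pvDiffWitness_solution.2.1) (pvDiffWitness_solution.2.2) = pvDiffWitnessOut_solution.2 ∧ pvDiffWitnessOut_solution.1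 ≠ pvDiffWitnessOut_solution.2
def Claim_exact_solution : Prop := ∀ (D : List Int) (C : List Int) (P : Int), Dom_solution D C P → Pre_solution D C P → D_solution D C P → solution D C P ≠ solution_alt D C P

-- ===== LEMMAS AND PROOFS =====

-- proof-side names for the two halves of Source B's sorted candidate list, and its loop as a
-- structural recursion (shown equal to the port's fold in alt_eq_scanB)
def candList (D : List Int) (C : List Int) : List Nat :=
  (List.range D.length).filter (fun i => decide (C.getD i 0 ≠ 0))

def nearSorted (D : List Int) (C : List Int) : List Nat :=
  PySem.List.sorted
    ((List.range D.length).filter (fun i => decide (C.getD i 0 ≠ 0) && decide (D.getD i 0 < 99999999)))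
    (fun i => D.getD i 0) false
def farSorted (D : List Int) (C : List Int) : List Nat :=
  PySem.List.sorted
    ((List.range D.length).filter (fun i => decide (C.getD i 0 ≠ 0) && decide (99999999 ≤ D.getD i 0)))
    (fun i => D.getD i 0) false
def sumC (C : List Int) (l : List Nat) : Int := (l.map (fun i => C.getD i 0)).sum

def scanB (C : List Int) : List Nat → Int → Int → Int
  | [], P, taken => if P > 0 then taken else taken - 1
  | i :: rest, P, taken => if P ≤ 0 then taken - 1 else scanB C rest (P - C.getD i 0) (taken + 1)

-- the sorted-list restatement of D_solution used by the proofs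
def DSpec (D : List Int) (C : List Int) (P : Int) : Prop :=
  (∀ k, k ≤ (nearSorted D C).length → P - sumC C ((nearSorted D C).take k) > 0) ∧
  farSorted D C ≠ [] ∧
  P - sumC C (nearSorted D C) - C.getD ((farSorted D C).headD 0) 0 > 0

-- 'a is served strictly before b' in (distance, index) order
def lexlt (D : List Int) (a b : Nat) : Prop :=
  D.getD a 0 < D.getD b 0 ∨ (D.getD a 0 = D.getD b 0 ∧ a < b)

-- the filter A's sentinel effectively applies: near candidates
def nearIdx (D : List Int) (C : List Int) : List Nat :=
  (List.range D.length).filter (fun i => decide (C.getD i 0 ≠ 0) && decide (D.getD i 0 < 99999999))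

-- Source B's loop consumes the whole index list l without the budget dropping to ≤ 0
def consumesAll (C : List Int) : List Nat → Int → Prop
  | [], _ => True
  | i :: rest, P => P > 0 ∧ consumesAll C rest (P - C.getD i 0)

-- == the port of B equals the structural recursion scanB ==

lemma foldl_stuck (C : List Int) (l : List Nat) :
    ∀ P taken, P ≤ 0 →
      l.foldl (fun s i => if s.1 > 0 then (s.1 - C.getD i 0, s.2 + 1) else s) ((P, taken) : Int × Int)
        = (P, taken) := by
  induction l with
  | nil => intro P taken _; rfl
  | cons i r ih =>
    intro P taken h
    simp only [List.foldl_cons, if_neg (by omega : ¬ P > 0)]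
    exact ih P taken h

lemma foldl_eq_scanB (C : List Int) (l : List Nat) :
    ∀ P taken,
      (let s := l.foldl (fun s i => if s.1 > 0 then (s.1 - C.getD i 0, s.2 + 1) else s)
          ((P, taken) : Int × Int)
       if s.1 > 0 then s.2 else s.2 - 1) = scanB C l P taken := by
  induction l with
  | nil => intro P taken; rfl
  | cons i r ih =>
    intro P taken
    by_cases hP : P > 0
    · simp only [List.foldl_cons, if_pos hP, scanB, if_neg (by omega : ¬ P ≤ 0)]
      exact ih (P - C.getD i 0) (taken + 1)
    · simp only [List.foldl_cons, if_neg hP, scanB, if_pos (by omega : P ≤ 0)]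
      rw [foldl_stuck C r P taken (by omega)]
      simp [hP]

lemma alt_eq_scanB (D C : List Int) (P : Int) :
    solution_alt D C P = scanB C (PySem.List.sorted (candList D C) (fun i => D.getD i 0) false) P 0 := by
  unfold solution_alt candList
  rw [← foldl_eq_scanB]
  have hfe : (List.range D.length).filter (fun i => C.getD i 0 != 0)
      = (List.range D.length).filter (fun i => decide (C.getD i 0 ≠ 0)) := by
    apply List.filter_congr
    intro i _
    show (C.getD i 0 != 0) = decide (C.getD i 0 ≠ 0)
    generalize C.getD i 0 = a
    by_cases h : a = 0 <;> simp [h, bne]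
  simp only [hfe]

-- == A's loop equals scanB over the sorted NEAR candidates ==

lemma insertBy_nil {α : Type} (b : α → α → Bool) (x : α) : PySem.List.insertBy b x [] = [x] := rfl

lemma insertBy_cons {α : Type} (b : α → α → Bool) (x y : α) (ys : List α) :
    PySem.List.insertBy b x (y :: ys) = if b x y then x :: y :: ys else y :: PySem.List.insertBy b x ys := rfl

lemma sorted_snoc (D : List Int) (xs : List Nat) (x : Nat) :
    PySem.List.sorted (xs ++ [x]) (fun i => D.getD i 0) false
      = PySem.List.insertBy (fun a b => decide (D.getD a 0 < D.getD b 0)) x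
          (PySem.List.sorted xs (fun i => D.getD i 0) false) := by
  rw [PySem.List.sorted_eq_foldl_insertBy, PySem.List.sorted_eq_foldl_insertBy,
    List.foldl_append, List.foldl_cons, List.foldl_nil]

-- the fold's state keeps s.1 ≤ 99999999, so non-candidate indices leave it unchanged:
-- the fold over any index list equals the fold over its near-candidate sublist
lemma fold_skip (D C : List Int) (l : List Nat) :
    ∀ s : Int × Nat, s.1 ≤ 99999999 →
      l.foldl (fun s i => if C.getD i 0 ≠ 0 ∧ D.getD i 0 < s.1 then (D.getD i 0, i) else s) s
        = (l.filter (fun i => decide (C.getD i 0 ≠ 0) && decide (D.getD i 0 < 99999999))).foldl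
            (fun s i => if C.getD i 0 ≠ 0 ∧ D.getD i 0 < s.1 then (D.getD i 0, i) else s) s := by
  induction l with
  | nil => intro s _; rfl
  | cons i t ih =>
    intro s hs
    by_cases hp : (decide (C.getD i 0 ≠ 0) && decide (D.getD i 0 < 99999999)) = true
    · simp only [List.filter_cons, hp, if_pos, List.foldl_cons]
      simp only [Bool.and_eq_true, decide_eq_true_eq] at hp
      apply ih
      split_ifs
      · exact le_of_lt hp.2
      · exact hs
    · have hp' : C.getD i 0 ≠ 0 → (99999999 : Int) ≤ D.getD i 0 := by
        simp only [Bool.and_eq_true, decide_eq_true_eq] at hp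
        intro h1
        by_contra h2
        exact hp ⟨h1, by omega⟩
      have hid : ¬ (C.getD i 0 ≠ 0 ∧ D.getD i 0 < s.1) := by
        rintro ⟨h1, h2⟩
        have := hp' h1
        omega
      simp only [List.filter_cons, hp, List.foldl_cons, if_neg hid, Bool.false_eq_true, if_false]
      exact ih s hs

-- characterisation of the first-minimum fold on a list of candidates: either nothing beats the
-- state, or the result is the first element attaining the minimum
lemma fm_split (D C : List Int) (l : List Nat) :
    ∀ s : Int × Nat, (∀ i ∈ l, C.getD i 0 ≠ 0) →
      (l.foldl (fun s i => if C.getD i 0 ≠ 0 ∧ D.getD i 0 < s.1 then (D.getD i 0, i) else s) s = s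
        ∧ ∀ i ∈ l, s.1 ≤ D.getD i 0)
      ∨ (∃ pre m suf, l = pre ++ m :: suf
          ∧ l.foldl (fun s i => if C.getD i 0 ≠ 0 ∧ D.getD i 0 < s.1 then (D.getD i 0, i) else s) s
              = (D.getD m 0, m)
          ∧ D.getD m 0 < s.1
          ∧ (∀ j ∈ pre, D.getD m 0 < D.getD j 0)
          ∧ (∀ j ∈ suf, D.getD m 0 ≤ D.getD j 0)) := by
  induction l with
  | nil => intro s _; left; exact ⟨rfl, by simp⟩
  | cons i t ih =>
    intro s hC
    have hCi : C.getD i 0 ≠ 0 := hC i (List.mem_cons_self ..)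
    have hCt : ∀ j ∈ t, C.getD j 0 ≠ 0 := fun j hj => hC j (List.mem_cons_of_mem _ hj)
    by_cases hlt : D.getD i 0 < s.1
    · have hcond : C.getD i 0 ≠ 0 ∧ D.getD i 0 < s.1 := ⟨hCi, hlt⟩
      rw [List.foldl_cons, if_pos hcond]
      rcases ih (D.getD i 0, i) hCt with ⟨heq, hall⟩ | ⟨pre, m, suf, hsp, heq, hm, hpre, hsuf⟩
      · right
        exact ⟨[], i, t, rfl, heq, hlt, by simp, hall⟩
      · right
        refine ⟨i :: pre, m, suf, by simp [hsp], heq, lt_trans hm hlt, ?_, hsuf⟩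
        intro j hj
        rcases List.mem_cons.mp hj with rfl | hj'
        · exact hm
        · exact hpre j hj'
    · have hid : ¬ (C.getD i 0 ≠ 0 ∧ D.getD i 0 < s.1) := fun h => hlt h.2
      rw [List.foldl_cons, if_neg hid]
      rcases ih s hCt with ⟨heq, hall⟩ | ⟨pre, m, suf, hsp, heq, hm, hpre, hsuf⟩
      · left
        refine ⟨heq, ?_⟩
        intro j hj
        rcases List.mem_cons.mp hj with rfl | hj'
        · omega
        · exact hall j hj'
      · right
        refine ⟨i :: pre, m, suf, by simp [hsp], heq, hm, ?_, hsuf⟩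
        intro j hj
        rcases List.mem_cons.mp hj with rfl | hj'
        · omega
        · exact hpre j hj'

-- stable insertion sort peels off a first minimum
lemma sorted_peel (D : List Int) (pre suf : List Nat) (m : Nat)
    (hpre : ∀ j ∈ pre, D.getD m 0 < D.getD j 0) (hsuf : ∀ j ∈ suf, D.getD m 0 ≤ D.getD j 0) :
    PySem.List.sorted (pre ++ m :: suf) (fun i => D.getD i 0) false
      = m :: PySem.List.sorted (pre ++ suf) (fun i => D.getD i 0) false := by
  induction suf using List.reverseRecOn with
  | nil =>
    rw [List.append_nil, sorted_snoc]
    cases hL : PySem.List.sorted pre (fun i => D.getD i 0) false with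
    | nil => rw [insertBy_nil]
    | cons y ys =>
      have hy : y ∈ pre := (PySem.List.mem_sorted ..).mp (hL ▸ List.mem_cons_self ..)
      rw [insertBy_cons, if_pos (by simpa using hpre y hy)]
  | append_singleton suf' j ihs =>
    have hsuf' : ∀ x ∈ suf', D.getD m 0 ≤ D.getD x 0 := fun x hx => hsuf x (by simp [hx])
    have hj : D.getD m 0 ≤ D.getD j 0 := hsuf j (by simp)
    have h1 : pre ++ m :: (suf' ++ [j]) = (pre ++ m :: suf') ++ [j] := by simp
    have h2 : pre ++ (suf' ++ [j]) = (pre ++ suf') ++ [j] := by rw [List.append_assoc]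
    rw [h1, h2, sorted_snoc, sorted_snoc, ihs hsuf', insertBy_cons,
      if_neg (by simpa using not_lt.mpr hj)]

lemma scanB_congr (C C' : List Int) (l : List Nat) (h : ∀ i ∈ l, C.getD i 0 = C'.getD i 0) :
    ∀ P taken, scanB C l P taken = scanB C' l P taken := by
  induction l with
  | nil => intro P taken; rfl
  | cons i t ih =>
    intro P taken
    simp only [scanB]
    split_ifs with hP
    · rfl
    · rw [h i (List.mem_cons_self ..), ih (fun j hj => h j (List.mem_cons_of_mem _ hj))]

lemma getD_set_ne (C : List Int) (m i : Nat) (h : i ≠ m) :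
    (C.set m 0).getD i 0 = C.getD i 0 := by
  simp [List.getD_eq_getElem?_getD, List.getElem?_set_ne (Ne.symm h)]

lemma nearIdx_set (D C : List Int) (m : Nat) (hm : m ∈ nearIdx D C) :
    nearIdx D (C.set m 0) = (nearIdx D C).filter (fun i => decide (i ≠ m)) := by
  have hm' := hm
  unfold nearIdx at hm'
  simp only [List.mem_filter, List.mem_range, Bool.and_eq_true, decide_eq_true_eq] at hm'
  have hmC : m < C.length := by
    by_contra hge
    exact hm'.2.1 (List.getD_eq_default _ _ (by omega))
  have hm0 : (C.set m 0).getD m 0 = 0 := by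
    simp [List.getD_eq_getElem?_getD, hmC]
  unfold nearIdx
  rw [List.filter_filter]
  apply List.filter_congr
  intro i _
  by_cases hi : i = m
  · subst hi
    have h0 : (C.set i 0)[i]?.getD 0 = 0 := by
      simpa [List.getD_eq_getElem?_getD] using hm0
    simp [h0]
  · have h1 : (C.set m 0)[i]?.getD 0 = C[i]?.getD 0 := by
      rw [List.getElem?_set_ne (Ne.symm hi)]
    simp [h1, hi]

-- A's loop equals Source B's pass over the SORTED NEAR candidates
lemma main_lemma (D : List Int) :
    ∀ (fuel : Nat) (C : List Int) (P count : Int),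
      (nearIdx D C).length < fuel →
      loopA D C P count fuel
        = scanB C (PySem.List.sorted (nearIdx D C) (fun i => D.getD i 0) false) P count := by
  intro fuel
  induction fuel with
  | zero => intro C P count h; exact absurd h (Nat.not_lt_zero _)
  | succ f ih =>
    intro C P count h
    by_cases hP : P > 0
    · have hfold : findNext D C
          = (nearIdx D C).foldl
              (fun s i => if C.getD i 0 ≠ 0 ∧ D.getD i 0 < s.1 then (D.getD i 0, i) else s)
              (99999999, D.length) := by
        unfold findNext nearIdx
        exact fold_skip D C (List.range D.length) (99999999, D.length) (le_refl _)
      by_cases hcl : nearIdx D C = []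
      · have hnm : findNext D C = (99999999, D.length) := by rw [hfold, hcl]; rfl
        have hsortnil : PySem.List.sorted (nearIdx D C) (fun i => D.getD i 0) false = [] :=
          (PySem.List.sorted_eq_nil_iff ..).mpr hcl
        rw [hsortnil]
        simp only [loopA, if_pos hP, hnm, scanB]
        simp
      ·
        have hC0 : ∀ i ∈ nearIdx D C, C.getD i 0 ≠ 0 := by
          intro i hi
          unfold nearIdx at hi
          simp only [List.mem_filter, Bool.and_eq_true, decide_eq_true_eq] at hi
          exact hi.2.1
        have hD0 : ∀ i ∈ nearIdx D C, D.getD i 0 < 99999999 := by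
          intro i hi
          unfold nearIdx at hi
          simp only [List.mem_filter, Bool.and_eq_true, decide_eq_true_eq] at hi
          exact hi.2.2
        have hrange : ∀ i ∈ nearIdx D C, i < D.length := by
          intro i hi
          unfold nearIdx at hi
          simp only [List.mem_filter, List.mem_range] at hi
          exact hi.1
        rcases fm_split D C (nearIdx D C) (99999999, D.length) hC0 with
          ⟨_, hall⟩ | ⟨pre, m, suf, hsp, heq, _, hpre, hsuf⟩
        · exfalso
          obtain ⟨c0, hc0⟩ := List.exists_mem_of_ne_nil _ hcl
          have h1 : (99999999 : Int) ≤ D.getD c0 0 := hall c0 hc0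
          have h2 := hD0 c0 hc0
          omega
        · have hmem : m ∈ nearIdx D C := hsp ▸ List.mem_append_right _ (List.mem_cons_self ..)
          have hmn : m < D.length := hrange m hmem
          have hnm : findNext D C = (D.getD m 0, m) := by rw [hfold]; exact heq
          have hsorted : PySem.List.sorted (nearIdx D C) (fun i => D.getD i 0) false
              = m :: PySem.List.sorted (pre ++ suf) (fun i => D.getD i 0) false := by
            rw [hsp]; exact sorted_peel D pre suf m hpre hsuf
          have hnodup : (nearIdx D C).Nodup := List.Nodup.filter _ List.nodup_range
          have hnodup' : (pre ++ m :: suf).Nodup := hsp ▸ hnodup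
          have hdisj := List.disjoint_of_nodup_append hnodup'
          have hmpre : m ∉ pre := fun hmp => hdisj hmp (List.mem_cons_self ..)
          have hmsuf : m ∉ suf :=
            (List.nodup_cons.mp (hnodup'.of_append_right)).1
          have hset : nearIdx D (C.set m 0) = pre ++ suf := by
            rw [nearIdx_set D C m hmem, hsp, List.filter_append, List.filter_cons]
            have hfp : List.filter (fun i => !decide (i = m)) pre = pre :=
              List.filter_eq_self.mpr (fun a ha => by
                simp only [Bool.not_eq_eq_eq_not, Bool.not_true, decide_eq_false_iff_not]
                rintro rfl
                exact hmpre ha)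
            have hfs : List.filter (fun i => !decide (i = m)) suf = suf :=
              List.filter_eq_self.mpr (fun a ha => by
                simp only [Bool.not_eq_eq_eq_not, Bool.not_true, decide_eq_false_iff_not]
                rintro rfl
                exact hmsuf ha)
            simp [hfp, hfs]
          have hlen : (nearIdx D (C.set m 0)).length < f := by
            rw [hset]
            rw [hsp] at h
            simp only [List.length_append, List.length_cons] at h ⊢
            omega
          have hgetDeq : ∀ i ∈ PySem.List.sorted (pre ++ suf) (fun i => D.getD i 0) false,
              (C.set m 0).getD i 0 = C.getD i 0 := by
            intro i hi
            have hi' : i ∈ pre ++ suf := (PySem.List.mem_sorted ..).mp hi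
            have hne : i ≠ m := by
              rintro rfl
              rcases List.mem_append.mp hi' with h' | h'
              · exact hmpre h'
              · exact hmsuf h'
            exact getD_set_ne C m i hne
          simp only [loopA, if_pos hP, hnm, if_neg (Nat.ne_of_lt hmn)]
          rw [hsorted]
          simp only [scanB, if_neg (not_le.mpr hP)]
          rw [ih (C.set m 0) (P - C.getD m 0) (count + 1) hlen, hset]
          exact scanB_congr (C.set m 0) C _ hgetDeq _ _
    · have hP' : P ≤ 0 := by omega
      simp only [loopA, if_neg hP]
      cases hL : PySem.List.sorted (nearIdx D C) (fun i => D.getD i 0) false with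
      | nil => simp [scanB, hP]
      | cons a l => simp [scanB, if_pos hP']

-- == the sorted candidate list splits at the 99999999 boundary ==

lemma insertBy_append_before {α : Type} (b : α → α → Bool) (x : α) (A B : List α)
    (hB : ∀ y ∈ B, b x y = true) :
    PySem.List.insertBy b x (A ++ B) = PySem.List.insertBy b x A ++ B := by
  induction A with
  | nil =>
    cases B with
    | nil => rfl
    | cons y ys => simp [insertBy_nil, insertBy_cons, hB y (List.mem_cons_self ..)]
  | cons a as ih =>
    simp only [List.cons_append, insertBy_cons, ih]
    split_ifs <;> simp

lemma insertBy_append_after {α : Type} (b : α → α → Bool) (x : α) (A B : List α)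
    (hA : ∀ y ∈ A, b x y = false) :
    PySem.List.insertBy b x (A ++ B) = A ++ PySem.List.insertBy b x B := by
  induction A with
  | nil => rfl
  | cons a as ih =>
    simp only [List.cons_append, insertBy_cons, hA a (List.mem_cons_self ..),
      Bool.false_eq_true, if_false, ih (fun y hy => hA y (List.mem_cons_of_mem _ hy))]

lemma sorted_split_at (D : List Int) (p : Nat → Bool)
    (hp : ∀ i j, p i = true → p j = false → D.getD i 0 < D.getD j 0) (l : List Nat) :
    PySem.List.sorted l (fun i => D.getD i 0) false
      = PySem.List.sorted (l.filter p) (fun i => D.getD i 0) false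
        ++ PySem.List.sorted (l.filter (fun i => !p i)) (fun i => D.getD i 0) false := by
  induction l using List.reverseRecOn with
  | nil => rfl
  | append_singleton l x ih =>
    rw [sorted_snoc, ih, List.filter_append, List.filter_append]
    by_cases hx : p x = true
    · have h2 : List.filter (fun i => !p i) [x] = [] := by simp [hx]
      have h1 : List.filter p [x] = [x] := by simp [hx]
      rw [h1, h2, List.append_nil, sorted_snoc]
      refine insertBy_append_before _ _ _ _ ?_
      intro y hy
      have hy' : p y = false := by
        have := (PySem.List.mem_sorted ..).mp hy
        simpa using (List.mem_filter.mp this).2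
      simpa using hp x y hx hy'
    · have hx' : p x = false := by simpa using hx
      have h1 : List.filter p [x] = [] := by simp [hx']
      have h2 : List.filter (fun i => !p i) [x] = [x] := by simp [hx']
      rw [h1, h2, List.append_nil, sorted_snoc]
      refine insertBy_append_after _ _ _ _ ?_
      intro y hy
      have hy' : p y = true := (List.mem_filter.mp ((PySem.List.mem_sorted ..).mp hy)).2
      simpa using not_lt.mpr (le_of_lt (hp y x hy' hx'))

lemma candList_split (D C : List Int) :
    PySem.List.sorted (candList D C) (fun i => D.getD i 0) false
      = nearSorted D C ++ farSorted D C := by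
  have hp : ∀ i j, (decide (D.getD i 0 < 99999999)) = true → (decide (D.getD j 0 < 99999999)) = false
      → D.getD i 0 < D.getD j 0 := by
    intro i j hi hj
    simp only [decide_eq_true_eq] at hi
    simp only [decide_eq_false_iff_not, not_lt] at hj
    omega
  have h := sorted_split_at D (fun i => decide (D.getD i 0 < 99999999)) hp (candList D C)
  rw [h]
  unfold nearSorted farSorted candList
  rw [List.filter_filter, List.filter_filter]
  have e1 : (List.range D.length).filter
        (fun a => decide (D.getD a 0 < 99999999) && decide (C.getD a 0 ≠ 0))
      = (List.range D.length).filter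
        (fun i => decide (C.getD i 0 ≠ 0) && decide (D.getD i 0 < 99999999)) :=
    List.filter_congr (fun i _ => Bool.and_comm _ _)
  have e2 : (List.range D.length).filter
        (fun a => !decide (D.getD a 0 < 99999999) && decide (C.getD a 0 ≠ 0))
      = (List.range D.length).filter
        (fun i => decide (C.getD i 0 ≠ 0) && decide (99999999 ≤ D.getD i 0)) := by
    apply List.filter_congr
    intro i _
    have hnd : (!decide (D.getD i 0 < 99999999)) = decide (99999999 ≤ D.getD i 0) := by
      rw [← decide_not]
      exact decide_eq_decide.mpr (by omega)
    rw [hnd, Bool.and_comm]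
  rw [e1, e2]

-- == scanB over an appended list ==

lemma scanB_nonpos (C : List Int) (l : List Nat) (P t : Int) (h : P ≤ 0) :
    scanB C l P t = t - 1 := by
  cases l with
  | nil =>
    have h' : ¬ P > 0 := by omega
    simp [scanB, h']
  | cons i r => simp [scanB, h]

lemma scanB_ge' (C : List Int) (l : List Nat) : ∀ P t, scanB C l P t ≥ t - 1 := by
  induction l with
  | nil => intro P t; simp only [scanB]; split_ifs <;> omega
  | cons i r ih =>
    intro P t
    simp only [scanB]
    split_ifs with h
    · omega
    · have := ih (P - C.getD i 0) (t + 1)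
      omega

lemma scanB_ge (C : List Int) (l : List Nat) (P t : Int) (h : P > 0) : scanB C l P t ≥ t := by
  cases l with
  | nil => simp [scanB, h]
  | cons i r =>
    simp only [scanB, if_neg (by omega : ¬ P ≤ 0)]
    have := scanB_ge' C r (P - C.getD i 0) (t + 1)
    omega

lemma scanB_append_not_all (C : List Int) (l1 l2 : List Nat) :
    ∀ P t, ¬ consumesAll C l1 P → scanB C (l1 ++ l2) P t = scanB C l1 P t := by
  induction l1 with
  | nil => intro P t h; exact absurd trivial h
  | cons i r ih =>
    intro P t h
    simp only [List.cons_append, scanB]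
    split_ifs with hP
    · rfl
    · have hr : ¬ consumesAll C r (P - C.getD i 0) := by
        intro hc
        exact h ⟨by omega, hc⟩
      exact ih _ _ hr

lemma scanB_append_all (C : List Int) (l1 l2 : List Nat) :
    ∀ P t, consumesAll C l1 P →
      scanB C (l1 ++ l2) P t = scanB C l2 (P - sumC C l1) (t + l1.length) := by
  induction l1 with
  | nil => intro P t _; simp [sumC]
  | cons i r ih =>
    intro P t h
    obtain ⟨hP, hr⟩ := h
    simp only [List.cons_append, scanB, if_neg (by omega : ¬ P ≤ 0)]
    rw [ih _ _ hr]
    congr 1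
    · simp [sumC]; ring
    · simp; ring

lemma scanB_all_val (C : List Int) (l : List Nat) (P t : Int) (h : consumesAll C l P) :
    scanB C l P t = if P - sumC C l > 0 then t + l.length else t + l.length - 1 := by
  have := scanB_append_all C l [] P t h
  rw [List.append_nil] at this
  rw [this]
  simp [scanB]

lemma consumesAll_take (C : List Int) (l : List Nat) :
    ∀ P, consumesAll C l P → ∀ k, k < l.length → P - sumC C (l.take k) > 0 := by
  induction l with
  | nil => intro P _ k hk; simp at hk
  | cons i r ih =>
    intro P h k hk
    obtain ⟨hP, hr⟩ := h
    cases k with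
    | zero => simpa [sumC] using hP
    | succ k' =>
      have := ih _ hr k' (by simpa using hk)
      simp only [List.take_succ_cons, sumC, List.map_cons, List.sum_cons] at *
      omega

lemma take_consumesAll (C : List Int) (l : List Nat) :
    ∀ P, (∀ k, k < l.length → P - sumC C (l.take k) > 0) → consumesAll C l P := by
  induction l with
  | nil => intro P _; trivial
  | cons i r ih =>
    intro P h
    refine ⟨by simpa [sumC] using h 0 (by simp), ?_⟩
    apply ih
    intro k hk
    have := h (k + 1) (by simpa using hk)
    simp only [List.take_succ_cons, sumC, List.map_cons, List.sum_cons] at *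
    omega

-- == bridging the closed-form D_solution to its sorted-list restatement DSpec ==

lemma lexlt_of_pairwise_mem {D : List Int} {l : List Nat} (h : l.Pairwise (lexlt D))
    {k : Nat} (hk : k < l.length) {j : Nat} :
    (j ∈ l ∧ lexlt D j l[k]) ↔ j ∈ l.take k := by
  have hpw := List.pairwise_iff_getElem.mp h
  constructor
  · rintro ⟨hj, hlex⟩
    obtain ⟨p, hp, rfl⟩ := List.mem_iff_getElem.mp hj
    rcases Nat.lt_trichotomy p k with hpk | rfl | hpk
    · exact List.mem_take_iff_getElem.mpr ⟨p, by omega, by simp⟩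
    · unfold lexlt at hlex; omega
    · have := hpw k p hk hp hpk
      unfold lexlt at this hlex
      omega
  · intro hj
    obtain ⟨p, hp, rfl⟩ := List.mem_iff_getElem.mp hj
    rw [List.getElem_take] at *
    have hpk : p < k := by simp at hp; omega
    exact ⟨List.getElem_mem _, hpw p k (by omega) hk hpk⟩

lemma insertBy_pairwise (D : List Int) (x : Nat) (l : List Nat)
    (hl : l.Pairwise (lexlt D)) (hx : ∀ y ∈ l, y < x) :
    (PySem.List.insertBy (fun a b => decide (D.getD a 0 < D.getD b 0)) x l).Pairwise (lexlt D) := by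
  induction l with
  | nil => simp [insertBy_nil]
  | cons y ys ih =>
    rw [insertBy_cons]
    obtain ⟨hy, hys⟩ := List.pairwise_cons.mp hl
    split_ifs with hb
    · simp only [decide_eq_true_eq] at hb
      refine List.pairwise_cons.mpr ⟨?_, hl⟩
      intro z hz
      rcases List.mem_cons.mp hz with rfl | hz'
      · exact Or.inl hb
      · have := hy z hz'
        unfold lexlt at *
        omega
    · simp only [decide_eq_true_eq, not_lt] at hb
      refine List.pairwise_cons.mpr ⟨?_, ih hys (fun z hz => hx z (List.mem_cons_of_mem _ hz))⟩
      intro z hz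
      rcases (PySem.List.mem_insertBy ..).mp hz with hzx | hz'
      · subst hzx
        have hyx : y < z := hx y (List.mem_cons_self ..)
        unfold lexlt
        omega
      · exact hy z hz'

lemma sorted_pairwise_lexlt (D : List Int) (base : List Nat) (hb : base.Pairwise (· < ·)) :
    (PySem.List.sorted base (fun i => D.getD i 0) false).Pairwise (lexlt D) := by
  induction base using List.reverseRecOn with
  | nil => simp [PySem.List.sorted]
  | append_singleton l x ih =>
    obtain ⟨h1, _, h3⟩ := List.pairwise_append.mp hb
    rw [sorted_snoc]
    exact insertBy_pairwise D x _ (ih h1)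
      (fun y hy => h3 y ((PySem.List.mem_sorted ..).mp hy) x (List.mem_singleton_self _))

lemma nearSorted_pairwise (D C : List Int) : (nearSorted D C).Pairwise (lexlt D) :=
  sorted_pairwise_lexlt D _ (List.Pairwise.sublist List.filter_sublist List.pairwise_lt_range)

lemma farSorted_pairwise (D C : List Int) : (farSorted D C).Pairwise (lexlt D) :=
  sorted_pairwise_lexlt D _ (List.Pairwise.sublist List.filter_sublist List.pairwise_lt_range)

lemma lexlt_nodup {D : List Int} {l : List Nat} (h : l.Pairwise (lexlt D)) : l.Nodup :=
  h.imp (fun {a b} hab => by unfold lexlt at hab; rintro rfl; omega)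

lemma mem_nearSorted (D C : List Int) (i : Nat) :
    i ∈ nearSorted D C ↔ i < D.length ∧ (C.getD i 0 ≠ 0 ∧ D.getD i 0 < 99999999) := by
  unfold nearSorted
  rw [PySem.List.mem_sorted, List.mem_filter, List.mem_range]
  simp

lemma mem_farSorted (D C : List Int) (i : Nat) :
    i ∈ farSorted D C ↔ i < D.length ∧ (C.getD i 0 ≠ 0 ∧ 99999999 ≤ D.getD i 0) := by
  unfold farSorted
  rw [PySem.List.mem_sorted, List.mem_filter, List.mem_range]
  simp

lemma mapIf_sum (p : Nat → Prop) [DecidablePred p] (f : Nat → Int) (l : List Nat) :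
    (l.map (fun j => if p j then f j else 0)).sum = ((l.filter (fun j => decide (p j))).map f).sum := by
  induction l with
  | nil => rfl
  | cons a t ih =>
    by_cases ha : p a <;> simp [ha, ih]

lemma finsetSum_eq_rangeSum (n : Nat) (g : Nat → Int) :
    (∑ j ∈ Finset.range n, g j) = ((List.range n).map g).sum := by
  induction n with
  | zero => rfl
  | succ m ih => rw [Finset.sum_range_succ, List.range_succ, List.map_append, List.sum_append, ih]; simp

-- sums of capacities over equal index sets agree
lemma sumC_eq_of_mem_iff {C : List Int} {l1 l2 : List Nat} (h1 : l1.Nodup) (h2 : l2.Nodup)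
    (h : ∀ j, j ∈ l1 ↔ j ∈ l2) : sumC C l1 = sumC C l2 := by
  have hp : l1.Perm l2 := List.perm_of_nodup_nodup_toFinset_eq h1 h2
    (Finset.ext (by simpa [List.mem_toFinset] using h))
  exact (hp.map (fun i => C.getD i 0)).sum_eq

lemma range_filter_nodup (p : Nat → Bool) (n : Nat) : ((List.range n).filter p).Nodup :=
  List.Nodup.filter _ (List.nodup_range)

-- spentNearer at the k-th sorted near candidate is the prefix sum of the sorted near list
lemma spentNearer_at_near (D C : List Int) (k : Nat) (hk : k < (nearSorted D C).length) :
    spentNearer D C ((nearSorted D C)[k]) = sumC C ((nearSorted D C).take k) := by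
  unfold spentNearer
  rw [finsetSum_eq_rangeSum, mapIf_sum]
  show sumC C _ = _
  apply sumC_eq_of_mem_iff (range_filter_nodup _ _)
    ((lexlt_nodup (nearSorted_pairwise D C)).sublist (List.take_sublist _ _))
  intro j
  rw [List.mem_filter, List.mem_range, decide_eq_true_eq,
    ← lexlt_of_pairwise_mem (nearSorted_pairwise D C) hk, mem_nearSorted]
  unfold lexlt
  tauto

-- spentNearer at any far candidate is the total capacity of all near candidates
lemma spentNearer_at_far (D C : List Int) (f : Nat) (hf : 99999999 ≤ D.getD f 0) :
    spentNearer D C f = sumC C (nearSorted D C) := by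
  unfold spentNearer
  rw [finsetSum_eq_rangeSum, mapIf_sum]
  show sumC C _ = _
  apply sumC_eq_of_mem_iff (range_filter_nodup _ _) (lexlt_nodup (nearSorted_pairwise D C))
  intro j
  rw [List.mem_filter, List.mem_range, decide_eq_true_eq, mem_nearSorted]
  constructor
  · rintro ⟨h1, h2, h3, _⟩; exact ⟨h1, h2, h3⟩
  · rintro ⟨h1, h2, h3⟩; exact ⟨h1, h2, h3, Or.inl (by omega)⟩

-- the head of the sorted far list is the (distance, index)-least far candidate
lemma far_head_min (D C : List Int) (f0 : Nat) (rest : List Nat)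
    (hf : farSorted D C = f0 :: rest) :
    ∀ j ∈ farSorted D C, f0 = j ∨ lexlt D f0 j := by
  intro j hj
  rw [hf] at hj
  rcases List.mem_cons.mp hj with rfl | hj'
  · exact Or.inl rfl
  · have := (List.pairwise_cons.mp (hf ▸ farSorted_pairwise D C)).1
    exact Or.inr (this j hj')

-- the closed-form change region coincides with its sorted-list reformulation
lemma D_iff_DSpec (D C : List Int) (P : Int) : D_solution D C P ↔ DSpec D C P := by
  constructor
  · rintro ⟨h1, f, hfr, hfp1, hfp2, hfmin, hfS, hfcap⟩
    rw [List.mem_range] at hfr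
    have hfmem : f ∈ farSorted D C := (mem_farSorted D C f).mpr ⟨hfr, hfp1, hfp2⟩
    have hfs : farSorted D C ≠ [] := List.ne_nil_of_mem hfmem
    obtain ⟨f0, rest, hf⟩ := List.exists_cons_of_ne_nil hfs
    have hf0mem : f0 ∈ farSorted D C := hf ▸ List.mem_cons_self ..
    have hf0p := (mem_farSorted D C f0).mp hf0mem
    have hff0 : f = f0 := by
      have hA := hfmin f0 (List.mem_range.mpr hf0p.1) hf0p.2.1 hf0p.2.2
      have hB := far_head_min D C f0 rest hf f hfmem
      unfold lexlt at hB
      rcases hA with rfl | hA' | hA' <;> rcases hB with hB' | hB' <;> omega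
    refine ⟨?_, hfs, ?_⟩
    · intro k hk
      rcases Nat.lt_or_ge k (nearSorted D C).length with hlt | hge
      · have hi := (mem_nearSorted D C _).mp (List.getElem_mem hlt)
        have := h1 ((nearSorted D C)[k]) (List.mem_range.mpr hi.1) hi.2.1 hi.2.2
        rwa [spentNearer_at_near D C k hlt] at this
      · have hk' : k = (nearSorted D C).length := by omega
        subst hk'
        rw [List.take_length, ← spentNearer_at_far D C f hfp2]
        exact hfS
    · rw [hf, List.headD_cons, ← hff0, ← spentNearer_at_far D C f hfp2]
      exact hfcap
  · rintro ⟨hk, hfs, hcap⟩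
    obtain ⟨f0, rest, hf⟩ := List.exists_cons_of_ne_nil hfs
    have hf0mem : f0 ∈ farSorted D C := hf ▸ List.mem_cons_self ..
    have hf0p := (mem_farSorted D C f0).mp hf0mem
    have hS : P - sumC C (nearSorted D C) > 0 := by
      have := hk (nearSorted D C).length (le_refl _)
      rwa [List.take_length] at this
    refine ⟨?_, f0, List.mem_range.mpr hf0p.1, hf0p.2.1, hf0p.2.2, ?_, ?_, ?_⟩
    · intro i hir hin1 hin2
      rw [List.mem_range] at hir
      have hi : i ∈ nearSorted D C := (mem_nearSorted D C i).mpr ⟨hir, hin1, hin2⟩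
      obtain ⟨k, hklt, rfl⟩ := List.mem_iff_getElem.mp hi
      rw [spentNearer_at_near D C k hklt]
      exact hk k (le_of_lt hklt)
    · intro j hjr hjp1 hjp2
      rw [List.mem_range] at hjr
      exact far_head_min D C f0 rest hf j ((mem_farSorted D C j).mpr ⟨hjr, hjp1, hjp2⟩)
    · rw [spentNearer_at_far D C f0 hf0p.2.2]
      exact hS
    · rw [spentNearer_at_far D C f0 hf0p.2.2]
      rw [hf, List.headD_cons] at hcap
      exact hcap

-- outside the change region, Source B's pass over near ++ far equals its pass over near alone
lemma tail_agree (D C : List Int) (P : Int) (hnd : ¬ DSpec D C P) :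
    scanB C (nearSorted D C ++ farSorted D C) P 0 = scanB C (nearSorted D C) P 0 := by
  by_cases hall : consumesAll C (nearSorted D C) P
  · rw [scanB_append_all C _ _ P 0 hall, scanB_all_val C _ P 0 hall]
    cases hf : farSorted D C with
    | nil => simp [scanB]
    | cons f0 rest =>
      by_cases hPS : P - sumC C (nearSorted D C) > 0
      · have hcap : ¬ P - sumC C (nearSorted D C) - C.getD f0 0 > 0 := by
          intro hgt
          apply hnd
          refine ⟨?_, by simp [hf], ?_⟩
          · intro k hk
            rcases Nat.lt_or_ge k (nearSorted D C).length with hlt | hge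
            · exact consumesAll_take C _ P hall k hlt
            · have hk' : k = (nearSorted D C).length := by omega
              subst hk'
              simpa [List.take_length] using hPS
          · rw [hf]; simpa using hgt
        simp only [scanB, if_neg (by omega : ¬ P - sumC C (nearSorted D C) ≤ 0), if_pos hPS]
        rw [scanB_nonpos C rest _ _ (by omega)]
        omega
      · simp only [scanB, if_pos (by omega : P - sumC C (nearSorted D C) ≤ 0), if_neg hPS]
  · rw [scanB_append_not_all C _ _ P 0 hall]

-- ===== VERDICT (by name: the statement is the Claim_ definition above) =====
theorem solution_spec : Claim_unchanged_solution := by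
  intro D C P _ _ hnd
  unfold solution
  rw [alt_eq_scanB]
  have hle : (nearIdx D C).length ≤ D.length := by
    have := List.length_filter_le
      (fun i => decide (C.getD i 0 ≠ 0) && decide (D.getD i 0 < 99999999)) (List.range D.length)
    simpa [nearIdx] using this
  rw [main_lemma D (D.length + 1) C P 0 (Nat.lt_succ_of_le hle), candList_split]
  have hnear : PySem.List.sorted (nearIdx D C) (fun i => D.getD i 0) false = nearSorted D C := rfl
  rw [hnear, (tail_agree D C P (fun hds => hnd ((D_iff_DSpec D C P).mpr hds)))]

theorem solution_changed : Claim_changed_solution := by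
  unfold Claim_changed_solution; decide

theorem solution_tight : Claim_exact_solution := by
  intro D C P _ _ hd
  obtain ⟨hks, hfar, hf0⟩ := (D_iff_DSpec D C P).mp hd
  unfold solution
  rw [alt_eq_scanB]
  have hle : (nearIdx D C).length ≤ D.length := by
    have := List.length_filter_le
      (fun i => decide (C.getD i 0 ≠ 0) && decide (D.getD i 0 < 99999999)) (List.range D.length)
    simpa [nearIdx] using this
  rw [main_lemma D (D.length + 1) C P 0 (Nat.lt_succ_of_le hle), candList_split]
  have hnear : PySem.List.sorted (nearIdx D C) (fun i => D.getD i 0) false = nearSorted D C := rfl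
  rw [hnear]
  have hall : consumesAll C (nearSorted D C) P :=
    take_consumesAll C _ P (fun k hk => hks k (le_of_lt hk))
  have hPS : P - sumC C (nearSorted D C) > 0 := by
    have := hks (nearSorted D C).length (le_refl _)
    simpa [List.take_length] using this
  rw [scanB_all_val C _ P 0 hall, if_pos hPS, scanB_append_all C _ _ P 0 hall]
  cases hf : farSorted D C with
  | nil => exact absurd hf hfar
  | cons f0 rest =>
    rw [hf] at hf0
    simp only [List.headD_cons] at hf0
    simp only [scanB, if_neg (by omega : ¬ P - sumC C (nearSorted D C) ≤ 0)]
    have := scanB_ge C rest (P - sumC C (nearSorted D C) - C.getD f0 0)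
      (0 + (nearSorted D C).length + 1) (by omega)
    intro heq
    omega
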